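-- pv_equiv track=rewrite | github.com/openSUSE/py2pack | py2pack/parse.py | get_homepage
-- ===== SOURCE A (Python) =====
-- def lowercase_dict(d):
--     ret = {}
--     for key, value in d.items():
--         ret[str(key).lower()] = value
--     return ret
--
-- def get_homepage(urls):
--     try:
--         urls = lowercase_dict(urls)
--         for page in ('homepage', 'source', 'github', 'repository', 'gitlab'):
--             if page in urls:
--                 return urls[page]
--     except Exception:
--         return None
-- ===== SOURCE B (Python) =====
-- def get_homepage(urls):
--     try:
--         items = list(urls.items())
--     except Exception:
--         return None
--     for page in ('homepage', 'source', 'github', 'repository', 'gitlab'):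
--         found = None
--         hit = False
--         for key, value in items:
--             if str(key).lower() == page:
--                 found = value
--                 hit = True
--         if hit:
--             return found
--     return None
-- ===== Notes on version B (the rewrite author's own statement) =====
-- stated objective: alternative
-- what changed: B builds no lowercased dict: for each priority name in order it scans the items once, remembering the value of the LAST item whose lowercased key equals it (matching the dict's overwrite semantics), and returns on the first priority that matched.
import Mathlib
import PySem

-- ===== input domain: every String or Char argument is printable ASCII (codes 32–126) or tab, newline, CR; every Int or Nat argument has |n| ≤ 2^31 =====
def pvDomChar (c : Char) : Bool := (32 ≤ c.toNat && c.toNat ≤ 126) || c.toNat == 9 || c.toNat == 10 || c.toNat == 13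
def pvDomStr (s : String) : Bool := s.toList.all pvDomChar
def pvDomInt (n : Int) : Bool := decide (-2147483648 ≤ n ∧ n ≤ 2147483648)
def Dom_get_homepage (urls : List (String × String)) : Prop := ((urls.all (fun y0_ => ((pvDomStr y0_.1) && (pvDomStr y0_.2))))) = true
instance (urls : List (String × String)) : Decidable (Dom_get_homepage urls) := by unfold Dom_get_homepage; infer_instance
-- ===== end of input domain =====

-- B scans the items per priority name remembering the last lowercase-key match, instead of building a lowercased dict; alternative decomposition, same cost.


-- ===== PORT A =====
def lowercase_dict (d : List (String × String)) : PySem.Dict String String :=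
  d.foldl (fun ret kv => ret.insert (PySem.Str.lower kv.1) kv.2) PySem.Dict.empty

def goA (u : PySem.Dict String String) : List String → Option String
  | [] => none
  | p :: ps => if u.contains p then u.get? p else goA u ps

def get_homepage (urls : List (String × String)) : Option String :=
  goA (lowercase_dict urls) ["homepage", "source", "github", "repository", "gitlab"]

-- ===== PORT B =====
-- last item whose lowercased key equals page (found/hit folded into one Option)
def lastMatch (items : List (String × String)) (page : String) : Option String :=
  items.foldl (fun acc kv => if PySem.Str.lower kv.1 = page then some kv.2 else acc) none

def goB (items : List (String × String)) : List String → Option String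
  | [] => none
  | p :: ps =>
    match lastMatch items p with
    | some v => some v
    | none => goB items ps

def get_homepage_alt (urls : List (String × String)) : Option String :=
  goB urls ["homepage", "source", "github", "repository", "gitlab"]

-- ===== PRECONDITION & SPEC =====
def Spec_get_homepage (urls : List (String × String)) (out : Option String) : Prop := out = get_homepage_alt urls
instance (urls : List (String × String)) (out : Option String) : Decidable (Spec_get_homepage urls out) := by unfold Spec_get_homepage; infer_instance

-- ===== CLAIM (what is proved, stated in full; the proofs are below) =====
def Claim_equal_get_homepage : Prop := ∀ (urls : List (String × String)), Dom_get_homepage urls → Spec_get_homepage urls (get_homepage urls)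

-- ===== LEMMAS AND PROOFS =====
theorem get?_foldl_insert (items : List (String × String)) (acc : PySem.Dict String String) (p : String) :
    (items.foldl (fun ret kv => ret.insert (PySem.Str.lower kv.1) kv.2) acc).get? p
    = items.foldl (fun a kv => if PySem.Str.lower kv.1 = p then some kv.2 else a) (acc.get? p) := by
  induction items generalizing acc with
  | nil => rfl
  | cons kv tl ih =>
    simp only [List.foldl_cons]
    rw [ih, PySem.Dict.get?_insert]
    simp [eq_comm]

theorem get?_lowercase_eq_lastMatch (items : List (String × String)) (p : String) :
    (lowercase_dict items).get? p = lastMatch items p := by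
  simp [lowercase_dict, lastMatch, get?_foldl_insert, PySem.Dict.get?_empty]

theorem goA_eq_goB (items : List (String × String)) (ps : List String) :
    goA (lowercase_dict items) ps = goB items ps := by
  induction ps with
  | nil => rfl
  | cons p ps ih =>
    simp only [goA, goB, ih, PySem.Dict.contains_eq_isSome_get?, get?_lowercase_eq_lastMatch]
    cases lastMatch items p <;> simp

-- ===== VERDICT (by name: the statement is the Claim_ definition above) =====
theorem get_homepage_spec : Claim_equal_get_homepage := by
  intro urls _
  show get_homepage urls = get_homepage_alt urls
  exact goA_eq_goB urls _
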